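-- pv_equiv track=rewrite | github.com/acherm/agentic-arnoldc | generate_bf_interpreter.py | estimate_tape_size
-- ===== SOURCE A (Python) =====
-- def estimate_tape_size(bf_source):
--     """Estimate the maximum tape cell index touched by a BF program."""
--     pos = 0
--     max_pos = 0
--     for c in bf_source:
--         if c == '>':
--             pos += 1
--             max_pos = max(max_pos, pos)
--         elif c == '<':
--             pos -= 1
--     return max_pos + 1
-- ===== SOURCE B (Python) =====
-- def estimate_tape_size(bf_source):
--     """Estimate the maximum tape cell index touched by a BF program.
--
--     Divide and conquer: each segment is summarised by (total, maxpref) where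
--     total is its net pointer delta and maxpref the maximum (clamped >= 0)
--     prefix delta; segments combine by (t1+t2, max(p1, t1+p2)).
--     """
--     def delta(c):
--         return 1 if c == '>' else -1 if c == '<' else 0
--
--     def go(lo, hi):
--         if hi - lo == 0:
--             return (0, 0)
--         if hi - lo == 1:
--             d = delta(bf_source[lo])
--             return (d, max(0, d))
--         mid = lo + (hi - lo) // 2
--         t1, p1 = go(lo, mid)
--         t2, p2 = go(mid, hi)
--         return (t1 + t2, max(p1, t1 + p2))
--
--     return go(0, len(bf_source))[1] + 1
-- ===== Notes on version B (the rewrite author's own statement) =====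
-- stated objective: alternative
-- what changed: Replaces the single fused left-to-right scan with a divide-and-conquer over halves of the source, summarising each segment by (net delta, clamped max prefix delta) and combining summaries monoidally.
import Mathlib
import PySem

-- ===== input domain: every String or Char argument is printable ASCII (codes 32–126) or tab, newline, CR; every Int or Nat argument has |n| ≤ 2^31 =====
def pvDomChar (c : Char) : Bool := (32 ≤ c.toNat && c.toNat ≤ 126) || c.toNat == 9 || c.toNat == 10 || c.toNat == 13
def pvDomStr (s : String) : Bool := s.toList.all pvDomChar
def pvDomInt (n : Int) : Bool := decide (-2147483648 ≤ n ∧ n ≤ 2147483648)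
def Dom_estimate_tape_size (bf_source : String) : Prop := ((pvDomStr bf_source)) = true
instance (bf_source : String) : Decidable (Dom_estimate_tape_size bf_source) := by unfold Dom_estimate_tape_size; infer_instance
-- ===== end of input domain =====

-- B replaces A's fused left-to-right scan by a divide-and-conquer that summarises each half as (net delta, clamped max prefix delta) and combines summaries (alternative; same cost).
-- ===== PORT A =====
def estimate_tape_size (bf_source : String) : Int :=
  let st := bf_source.toList.foldl
    (fun (st : Int × Int) c =>
      if c = '>' then (st.1 + 1, max st.2 (st.1 + 1))
      else if c = '<' then (st.1 - 1, st.2)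
      else st) (0, 0)
  st.2 + 1

-- ===== PORT B =====
def etsDelta (c : Char) : Int := if c = '>' then 1 else if c = '<' then -1 else 0

-- go of Source B, on the segment as a list: (total delta, max prefix delta clamped at 0)
def etsGo : List Char → Int × Int
  | [] => (0, 0)
  | [c] => (etsDelta c, max 0 (etsDelta c))
  | c1 :: c2 :: rest =>
      let cs := c1 :: c2 :: rest
      let mid := cs.length / 2
      let l := etsGo (cs.take mid)
      let r := etsGo (cs.drop mid)
      (l.1 + r.1, max l.2 (l.1 + r.2))
termination_by cs => cs.length
decreasing_by
· simp [List.length_take]; omega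
· simp [List.length_drop]; omega

def estimate_tape_size_alt (bf_source : String) : Int :=
  (etsGo bf_source.toList).2 + 1

-- ===== PRECONDITION & SPEC =====
def Spec_estimate_tape_size (bf_source : String) (out : Int) : Prop := out = estimate_tape_size_alt bf_source
instance (bf_source : String) (out : Int) : Decidable (Spec_estimate_tape_size bf_source out) := by unfold Spec_estimate_tape_size; infer_instance

-- ===== CLAIM (what is proved, stated in full; the proofs are below) =====
def Claim_equal_estimate_tape_size : Prop := ∀ (bf_source : String), Dom_estimate_tape_size bf_source → Spec_estimate_tape_size bf_source (estimate_tape_size bf_source)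

-- ===== LEMMAS AND PROOFS =====

-- net delta and clamped max prefix delta of a segment, the reference semantics
def etsT (cs : List Char) : Int := (cs.map etsDelta).sum
def etsP (cs : List Char) : Int := cs.foldr (fun c acc => max 0 (etsDelta c + acc)) 0

theorem etsP_nonneg (cs : List Char) : 0 ≤ etsP cs := by
  cases cs with
  | nil => simp [etsP]
  | cons c cs => simp [etsP]

theorem etsT_append (xs ys : List Char) : etsT (xs ++ ys) = etsT xs + etsT ys := by
  simp [etsT]

theorem etsP_append (xs ys : List Char) :
    etsP (xs ++ ys) = max (etsP xs) (etsT xs + etsP ys) := by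
  have hnn := etsP_nonneg ys
  induction xs with
  | nil => simp [etsP, etsT] at hnn ⊢; omega
  | cons c xs ih =>
    simp only [List.cons_append, etsP, List.foldr_cons, etsT, List.map_cons, List.sum_cons]
    have := ih
    simp only [etsP, etsT] at this
    rw [this]
    omega

theorem etsGo_eq (cs : List Char) : etsGo cs = (etsT cs, etsP cs) := by
  fun_induction etsGo cs with
  | case1 => simp [etsT, etsP]
  | case2 c => simp [etsT, etsP]
  | case3 c1 c2 rest cs mid l r ihl ihr =>
    show (l.1 + r.1, max l.2 (l.1 + r.2)) = (etsT cs, etsP cs)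
    rw [show l = etsGo (List.take mid cs) from rfl, show r = etsGo (List.drop mid cs) from rfl,
        ihl, ihr]
    have h := List.take_append_drop mid cs
    refine Prod.ext ?_ ?_
    · simpa using (etsT_append (List.take mid cs) (List.drop mid cs)).symm.trans (by rw [h])
    · simpa using (etsP_append (List.take mid cs) (List.drop mid cs)).symm.trans (by rw [h])

-- A's loop invariant: final max = max m (p + etsP cs), provided p ≤ m
theorem ets_invariant (cs : List Char) (p m : Int) (h : p ≤ m) :
    (cs.foldl
      (fun (st : Int × Int) c =>
        if c = '>' then (st.1 + 1, max st.2 (st.1 + 1))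
        else if c = '<' then (st.1 - 1, st.2)
        else st) (p, m)).2
    = max m (p + etsP cs) := by
  induction cs generalizing p m with
  | nil => simp [etsP]; omega
  | cons c cs ih =>
    have hnn := etsP_nonneg cs
    by_cases h1 : c = '>'
    · subst h1
      simp only [List.foldl_cons, Char.reduceEq, reduceIte]
      rw [ih (p + 1) (max m (p + 1)) (le_max_right _ _)]
      simp only [etsP, etsDelta, List.foldr_cons, Char.reduceEq, reduceIte, if_true] at hnn ⊢
      omega
    · by_cases h2 : c = '<'
      · subst h2
        simp only [List.foldl_cons, Char.reduceEq, reduceIte]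
        rw [ih (p - 1) m (by omega)]
        simp only [etsP, etsDelta, List.foldr_cons, Char.reduceEq, reduceIte, if_true] at hnn ⊢
        omega
      · simp only [List.foldl_cons, if_neg h1, if_neg h2]
        rw [ih p m h]
        simp only [etsP, etsDelta, List.foldr_cons, if_neg h1, if_neg h2] at hnn ⊢
        omega

-- ===== VERDICT (by name: the statement is the Claim_ definition above) =====
theorem estimate_tape_size_spec : Claim_equal_estimate_tape_size := by
  intro s _
  unfold Spec_estimate_tape_size estimate_tape_size estimate_tape_size_alt
  rw [etsGo_eq]
  show _ = etsP s.toList + 1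
  simp only []
  rw [ets_invariant s.toList 0 0 le_rfl]
  have := etsP_nonneg s.toList
  omega
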